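-- pv_equiv track=rewrite | github.com/Mikegabito/dataprojectdevelhope- | probability/person3_independent_events.py | most_common_non_null
-- ===== SOURCE A (Python) =====
-- def most_common_non_null(values):
--     counts = {}
--     for v in values:
--         if v is None:
--             continue
--         counts[v] = counts.get(v, 0) + 1
--     if not counts:
--         return None
--     return max(counts.items(), key=lambda x: x[1])[0]
-- ===== SOURCE B (Python) =====
-- def most_common_non_null(values):
--     xs = [v for v in values if v is not None]
--     return max(xs, key=xs.count, default=None)
-- ===== Notes on version B (the rewrite author's own statement) =====
-- stated objective: simpler
-- what changed: B drops the counts dict entirely: it filters out the Nones and returns max(xs, key=xs.count, default=None) -- a brute-force argmax by list.count over the filtered list (first element attaining the maximal count = first occurrence of the most common value, same tie-breaking as A's max over dict items).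
import Mathlib
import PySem

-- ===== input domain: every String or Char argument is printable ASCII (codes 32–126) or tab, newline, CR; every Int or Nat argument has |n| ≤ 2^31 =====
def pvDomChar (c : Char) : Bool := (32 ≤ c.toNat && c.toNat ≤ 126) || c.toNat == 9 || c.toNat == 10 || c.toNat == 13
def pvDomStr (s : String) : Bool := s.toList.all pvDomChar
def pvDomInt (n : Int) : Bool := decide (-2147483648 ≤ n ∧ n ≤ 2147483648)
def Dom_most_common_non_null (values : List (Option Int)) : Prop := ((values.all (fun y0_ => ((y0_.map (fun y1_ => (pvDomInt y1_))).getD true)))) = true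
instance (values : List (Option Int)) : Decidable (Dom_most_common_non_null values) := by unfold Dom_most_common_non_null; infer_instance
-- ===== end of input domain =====

-- B drops A's counts dict entirely: it is a brute-force argmax by list.count over the
-- None-filtered list (simpler code, quadratic instead of linear; same tie-breaking).

-- ===== PORT A =====
def most_common_non_null (values : List (Option Int)) : Option Int :=
  let counts : PySem.Dict Int Int :=
    values.foldl (fun counts v =>
      match v with
      | none => counts
      | some x => counts.insert x (counts.getD x 0 + 1)) PySem.Dict.empty
  if counts.items = [] then none
  else (PySem.List.max? counts.items (fun x => x.2)).map (fun x => x.1)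

-- ===== PORT B =====
def most_common_non_null_alt (values : List (Option Int)) : Option Int :=
  let xs := values.filterMap (fun v => v)
  PySem.List.max? xs (fun v => (PySem.List.count xs v : Int))

-- ===== PRECONDITION & SPEC =====
def Spec_most_common_non_null (values : List (Option Int)) (out : Option Int) : Prop := out = most_common_non_null_alt values
instance (values : List (Option Int)) (out : Option Int) : Decidable (Spec_most_common_non_null values out) := by unfold Spec_most_common_non_null; infer_instance

-- ===== CLAIM (what is proved, stated in full; the proofs are below) =====
def Claim_equal_most_common_non_null : Prop := ∀ (values : List (Option Int)), Dom_most_common_non_null values → Spec_most_common_non_null values (most_common_non_null values)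

-- ===== LEMMAS AND PROOFS =====

-- A's counting loop (skip None) is the Counter of the non-null values.
theorem foldA_eq_counter (values : List (Option Int)) (d : PySem.Dict Int Int) :
    values.foldl (fun counts v =>
      match v with
      | none => counts
      | some x => counts.insert x (counts.getD x 0 + 1)) d
    = (values.filterMap (fun v => v)).foldl (fun c x => c.insert x (c.getD x 0 + 1)) d := by
  induction values generalizing d with
  | nil => rfl
  | cons v t ih => cases v <;> simp [ih]

-- find? commutes with removing occurrences of a value the predicate rejects.
theorem find?_filter_ne (l : List Int) (x : Int) (p : Int → Bool) (hx : p x = false) :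
    (l.filter (fun y => !y == x)).find? p = l.find? p := by
  induction l with
  | nil => rfl
  | cons a t ih =>
    by_cases ha : a = x
    · subst ha; simp [hx, ih]
    · by_cases hp : p a <;> simp [ha, hp, ih]

-- find? commutes with first-occurrence dedup (PySem.Set.ofList).
theorem find?_ofList (xs : List Int) (p : Int → Bool) :
    (PySem.Set.ofList xs).find? p = xs.find? p := by
  induction xs with
  | nil => rfl
  | cons x t ih =>
    rw [PySem.Set.ofList_cons]
    by_cases hx : p x
    · simp [hx]
    · have hxf : p x = false := by simpa using hx
      rw [List.find?_cons_of_neg hx, List.find?_cons_of_neg hx]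
      simp only [PySem.Set.discard]
      rw [find?_filter_ne _ _ _ hxf, ih]

-- A bounded running max (Python's max step) never moves off an upper bound.
theorem foldl_maxstep_of_ub {α : Type} (key : α → Int) (t : List α) (a : α)
    (h : ∀ z ∈ t, key z ≤ key a) :
    t.foldl (fun acc x =>
      match acc with
      | none => some x
      | some m => if key m < key x then some x else some m) (some a) = some a := by
  induction t with
  | nil => rfl
  | cons z t ih =>
    have hz : ¬ key a < key z := not_lt.mpr (h z (by simp))
    simp only [List.foldl_cons, hz]
    exact ih (fun u hu => h u (by simp [hu]))

-- Python's max(l, key) returns the FIRST element attaining the maximum key value M.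
theorem foldl_maxstep_eq_find? {α : Type} (key : α → Int) (t : List α) (M : Int)
    (hmem : M ∈ t.map key) (hub : ∀ z ∈ t, key z ≤ M) (acc : Option α)
    (hacc : ∀ a, acc = some a → key a < M) :
    t.foldl (fun acc x =>
      match acc with
      | none => some x
      | some m => if key m < key x then some x else some m) acc
    = t.find? (fun z => key z == M) := by
  induction t generalizing acc with
  | nil => simp at hmem
  | cons z t ih =>
    rw [List.foldl_cons]
    by_cases hz : key z = M
    · have h1 : List.foldl
          (fun acc x =>
            match acc with
            | none => some x
            | some m => if key m < key x then some x else some m) (some z) t = some z :=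
        foldl_maxstep_of_ub key t z (fun u hu => hz ▸ hub u (by simp [hu]))
      have hfind : (z :: t).find? (fun z => key z == M) = some z := by
        simp [hz]
      rw [hfind]
      cases acc with
      | none => exact h1
      | some a =>
        have hlt : key a < key z := hz ▸ hacc a rfl
        show List.foldl _ (if key a < key z then some z else some a) t = some z
        rw [if_pos hlt]
        exact h1
    · have hlt : key z < M := lt_of_le_of_ne (hub z (by simp)) hz
      have hmem' : M ∈ t.map key := by
        rcases (List.mem_map.mp hmem) with ⟨y, hy, hk⟩
        rcases List.mem_cons.mp hy with h | h
        · exact absurd (h ▸ hk) hz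
        · exact List.mem_map.mpr ⟨y, h, hk⟩
      have hub' : ∀ u ∈ t, key u ≤ M := fun u hu => hub u (by simp [hu])
      have hfind : (z :: t).find? (fun z => key z == M) = t.find? (fun z => key z == M) := by
        simp [hz]
      rw [hfind]
      cases acc with
      | none =>
        exact ih hmem' hub' (some z) (fun a ha => by cases ha; exact hlt)
      | some a =>
        show List.foldl _ (if key a < key z then some z else some a) t = _
        by_cases hcmp : key a < key z
        · rw [if_pos hcmp]
          exact ih hmem' hub' (some z) (fun b hb => by cases hb; exact hlt)
        · rw [if_neg hcmp]
          exact ih hmem' hub' (some a) (fun b hb => by cases hb; exact hacc a rfl)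

theorem max?_eq_find? {α : Type} (key : α → Int) (l : List α) (M : Int)
    (hmem : M ∈ l.map key) (hub : ∀ z ∈ l, key z ≤ M) :
    PySem.List.max? l key = l.find? (fun z => key z == M) := by
  unfold PySem.List.max?
  exact foldl_maxstep_eq_find? key l M hmem hub none (by intro a h; cases h)

-- ===== VERDICT (by name: the statement is the Claim_ definition above) =====
theorem most_common_non_null_spec : Claim_equal_most_common_non_null := by
  intro values _
  unfold Spec_most_common_non_null most_common_non_null most_common_non_null_alt
  simp only [foldA_eq_counter, PySem.Dict.foldl_insert_getD_add_one_eq_counter]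
  set xs := values.filterMap (fun v => v) with hxs
  by_cases hnil : xs = []
  · rw [hnil]
    simp [PySem.List.max?, PySem.Dict.counter, PySem.Dict.empty]
  · -- B's max? returns the first element m of xs with maximal count; let M be that count
    obtain ⟨m, hm⟩ : ∃ m, PySem.List.max? xs (fun v => (PySem.List.count xs v : Int)) = some m := by
      cases h : PySem.List.max? xs (fun v => (PySem.List.count xs v : Int)) with
      | none => exact absurd ((PySem.List.max?_eq_none_iff _ _).mp h) hnil
      | some m => exact ⟨m, rfl⟩
    set M : Int := (PySem.List.count xs m : Int) with hM
    have hmmem : m ∈ xs := PySem.List.max?_mem hm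
    have hubxs : ∀ y ∈ xs, (PySem.List.count xs y : Int) ≤ M := by
      intro y hy; exact PySem.List.max?_isMax hm y hy
    have hitems_ne : (PySem.Dict.counter xs).items ≠ [] := by
      rw [PySem.Dict.items_counter]
      intro h
      have : m ∈ PySem.Set.ofList xs := (PySem.Set.mem_ofList xs m).mpr hmmem
      rw [List.map_eq_nil_iff.mp h] at this
      exact absurd this (List.not_mem_nil)
    rw [if_neg hitems_ne]
    -- A's argmax over the counter's items is the first item whose count is M
    rw [max?_eq_find? (fun p => p.2) ((PySem.Dict.counter xs).items) M
      (by
        rw [PySem.Dict.items_counter, List.map_map]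
        exact List.mem_map.mpr ⟨m, (PySem.Set.mem_ofList xs m).mpr hmmem, by
          simp [hM, PySem.List.count_eq]⟩)
      (by
        intro z hz
        rw [PySem.Dict.items_counter] at hz
        rcases List.mem_map.mp hz with ⟨k, hk, rfl⟩
        have : k ∈ xs := (PySem.Set.mem_ofList xs k).mp hk
        simpa [PySem.List.count_eq] using hubxs k this)]
    -- B's max? is the first element of xs whose count is M
    rw [max?_eq_find? (fun v => (PySem.List.count xs v : Int)) xs M
      (List.mem_map.mpr ⟨m, hmmem, rfl⟩) hubxs]
    -- both sides are the same find? over xs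
    rw [PySem.Dict.items_counter, List.find?_map, Option.map_map]
    rw [← find?_ofList xs (fun v => (PySem.List.count xs v : Int) == M)]
    simp [Function.comp_def, PySem.List.count_eq]
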